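-- pv_equiv track=rewrite | github.com/zoetan02/Testing | tests/test_giftredemption.py | extract_gift_amount
-- ===== SOURCE A (Python) =====
-- def extract_gift_amount(gift_title):
--     # Initialize an empty string to collect digits
--     digits = ""
--
--     # Iterate through each character in the gift title
--     for char in gift_title:
--         # If the character is a digit, add it to our digits string
--         if char.isdigit():
--             digits += char
--         # If we've hit a non-digit and already collected some digits, we can stop
--         elif digits:
--             break
--
--     # Convert the collected digits to an integer
--     # If no digits were found, default to 0
--     return int(digits) if digits else 0
-- ===== SOURCE B (Python) =====
-- def extract_gift_amount(gift_title):
--     # Right-to-left fold over the string: `run` is the digit run starting at the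
--     # current position, `first` the leftmost digit run seen so far.
--     run = ""
--     first = ""
--     for ch in reversed(gift_title):
--         if ch.isdigit():
--             run = ch + run
--             first = run
--         else:
--             run = ""
--     return int(first) if first else 0
-- ===== Notes on version B (the rewrite author's own statement) =====
-- stated objective: alternative
-- what changed: B replaces A's forward accumulate-then-break scan with a right-to-left fold over reversed(gift_title) that maintains a pair (digit run starting at the current position, leftmost digit run seen so far), so no break/early-exit logic is needed.
import Mathlib
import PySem

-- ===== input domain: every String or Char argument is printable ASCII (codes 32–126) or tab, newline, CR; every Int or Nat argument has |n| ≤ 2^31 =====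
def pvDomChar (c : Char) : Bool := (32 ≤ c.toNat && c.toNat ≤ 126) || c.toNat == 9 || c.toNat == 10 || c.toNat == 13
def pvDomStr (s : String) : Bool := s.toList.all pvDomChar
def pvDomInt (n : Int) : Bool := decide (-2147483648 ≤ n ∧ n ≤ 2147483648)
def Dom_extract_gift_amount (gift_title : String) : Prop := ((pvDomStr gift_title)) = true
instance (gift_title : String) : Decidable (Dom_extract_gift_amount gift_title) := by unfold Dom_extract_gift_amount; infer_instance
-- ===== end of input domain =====

-- B scans right-to-left (reversed string) maintaining a pair of digit runs, instead of
-- A's forward accumulate-then-break loop; same return value, no speed claim.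

-- ===== PORT A =====
-- A's loop: collect digits into `digits`, break on the first non-digit once `digits` is nonempty
def pvALoop : List Char → List Char → List Char
  | [], digits => digits
  | c :: cs, digits =>
      if PySem.Chars.isdigit c then pvALoop cs (digits ++ [c])
      else if digits ≠ [] then digits
      else pvALoop cs digits

def extract_gift_amount (gift_title : String) : Int :=
  let digits := pvALoop gift_title.toList []
  if digits ≠ [] then
    match PySem.Int.ofChars? digits with   -- int(digits); cannot fail on ASCII digit runs
    | some n => n
    | none => 0
  else 0

-- ===== PORT B =====
-- one step of B's loop body over reversed(gift_title): state = (run, first)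
def pvBStep (c : Char) (st : List Char × List Char) : List Char × List Char :=
  if PySem.Chars.isdigit c then (c :: st.1, c :: st.1) else ([], st.2)

def extract_gift_amount_alt (gift_title : String) : Int :=
  let st := gift_title.toList.foldr pvBStep ([], [])   -- for ch in reversed(gift_title): prepend-update
  if st.2 ≠ [] then
    match PySem.Int.ofChars? st.2 with                 -- int(first)
    | some n => n
    | none => 0
  else 0

-- ===== PRECONDITION & SPEC =====
def Spec_extract_gift_amount (gift_title : String) (out : Int) : Prop := out = extract_gift_amount_alt gift_title
instance (gift_title : String) (out : Int) : Decidable (Spec_extract_gift_amount gift_title out) := by unfold Spec_extract_gift_amount; infer_instance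

-- ===== CLAIM =====
def Claim_equal_extract_gift_amount : Prop := ∀ (gift_title : String), Dom_extract_gift_amount gift_title → Spec_extract_gift_amount gift_title (extract_gift_amount gift_title)

-- ===== LEMMAS AND PROOFS =====

-- A's loop with a nonempty accumulator just appends the following digit run
theorem pvALoop_ne (cs : List Char) : ∀ d : List Char, d ≠ [] →
    pvALoop cs d = d ++ cs.takeWhile PySem.Chars.isdigit := by
  induction cs with
  | nil => intro d _; simp [pvALoop]
  | cons c cs ih =>
      intro d hd
      by_cases h : PySem.Chars.isdigit c = true
      · simp [pvALoop, h, ih (d ++ [c]) (by simp)]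
      · simp [pvALoop, h, hd, List.takeWhile]

-- A's loop from the empty accumulator computes the first digit run
theorem pvALoop_nil (cs : List Char) :
    pvALoop cs [] = (cs.dropWhile (fun c => !PySem.Chars.isdigit c)).takeWhile
      PySem.Chars.isdigit := by
  induction cs with
  | nil => simp [pvALoop]
  | cons c cs ih =>
      by_cases h : PySem.Chars.isdigit c = true
      · simp [pvALoop, h, pvALoop_ne cs [c] (by simp), List.dropWhile]
      · simp [pvALoop, h, ih, List.dropWhile]

-- B's right-to-left fold: first component = digit prefix run, second = first digit run
theorem pvBFold (cs : List Char) :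
    cs.foldr pvBStep ([], []) =
      (cs.takeWhile PySem.Chars.isdigit,
       (cs.dropWhile (fun c => !PySem.Chars.isdigit c)).takeWhile PySem.Chars.isdigit) := by
  induction cs with
  | nil => simp
  | cons c cs ih =>
      by_cases h : PySem.Chars.isdigit c = true
      · simp [pvBStep, ih, h, List.takeWhile, List.dropWhile]
      · simp [pvBStep, ih, h, List.takeWhile, List.dropWhile]

-- ===== VERDICT =====
theorem extract_gift_amount_spec : Claim_equal_extract_gift_amount := by
  intro s _
  unfold Spec_extract_gift_amount extract_gift_amount extract_gift_amount_alt
  simp [pvALoop_nil, pvBFold]
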